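-- pv_equiv track=rewrite | github.com/peripherialabs/peribus | rio/acme/program_generators.py | format_directory_columns
-- ===== SOURCE A (Python) =====
-- def format_directory_columns(entries, width=80):
--     """Format directory entries in columns"""
--     if not entries:
--         return ""
--
--     # Find the longest entry
--     max_entry_len = max(len(entry) for entry in entries)
--
--     # Calculate column width (add 2 for spacing)
--     col_width = max_entry_len + 2
--
--     # Calculate number of columns that fit
--     num_cols = max(1, width // col_width)
--
--     # Calculate number of rows needed
--     num_rows = (len(entries) + num_cols - 1) // num_cols
--
--     # Build the output line by line
--     lines = []
--     for row in range(num_rows):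
--         line_parts = []
--         for col in range(num_cols):
--             idx = row + col * num_rows
--             if idx < len(entries):
--                 entry = entries[idx]
--                 # Pad to column width (except last column)
--                 if col < num_cols - 1:
--                     line_parts.append(entry.ljust(col_width))
--                 else:
--                     line_parts.append(entry)
--         lines.append("".join(line_parts).rstrip())
--
--     return "\n".join(lines)
-- ===== SOURCE B (Python) =====
-- def format_directory_columns(entries, width=80):
--     """Format directory entries in columns"""
--     if not entries:
--         return ""
--     col_width = max(len(e) for e in entries) + 2
--     num_cols = max(1, width // col_width)
--     num_rows = (len(entries) + num_cols - 1) // num_cols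
--     lines = ["".join(e.ljust(col_width) for e in entries[r::num_rows]).rstrip()
--              for r in range(num_rows)]
--     return "\n".join(lines)
-- ===== Notes on version B (the rewrite author's own statement) =====
-- stated objective: idiomatic
-- what changed: Replaces the nested row/column index loops and the last-column branch with a comprehension over stride slices entries[r::num_rows], padding every cell uniformly and letting rstrip remove the trailing padding.
import Mathlib
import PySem

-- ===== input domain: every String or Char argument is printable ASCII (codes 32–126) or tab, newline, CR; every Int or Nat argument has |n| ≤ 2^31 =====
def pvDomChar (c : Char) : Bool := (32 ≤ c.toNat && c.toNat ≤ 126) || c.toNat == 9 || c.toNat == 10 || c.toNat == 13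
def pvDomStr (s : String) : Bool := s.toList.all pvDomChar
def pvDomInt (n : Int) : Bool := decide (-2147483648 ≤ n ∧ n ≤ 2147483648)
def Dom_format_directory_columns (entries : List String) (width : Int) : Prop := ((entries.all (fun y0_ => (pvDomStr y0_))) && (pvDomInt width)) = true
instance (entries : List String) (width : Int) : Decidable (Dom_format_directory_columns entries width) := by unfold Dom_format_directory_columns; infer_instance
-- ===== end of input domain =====

-- B replaces A's nested row/column index loops (with their last-column branch) by stride
-- slices entries[r::num_rows], padding every cell uniformly and letting rstrip remove the
-- trailing padding; same result, same cost (objective: idiomatic).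

-- str.ljust(w) with the default fill character: exact (pads with ' ' on the right, no-op if w ≤ len)
def pyLjust (s : String) (w : Int) : String :=
  String.ofList (s.toList ++ List.replicate (w.toNat - s.toList.length) ' ')

-- ===== PORT A =====
def format_directory_columns (entries : List String) (width : Int) : String :=
  if entries = [] then ""
  else
    -- max(len(entry) for entry in entries); entries ≠ [] in this branch, so max? is some
    let maxEntryLen : Int := (PySem.List.max? (entries.map (fun e => PySem.Str.len e)) id).getD 0
    let colWidth : Int := maxEntryLen + 2
    let numCols : Int := max 1 (PySem.Int.floordiv width colWidth)
    let numRows : Int := PySem.Int.floordiv ((entries.length : Int) + numCols - 1) numCols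
    let lines : List String := (PySem.List.pyRange 0 numRows 1).foldl (fun lines row =>
      let lineParts : List String := (PySem.List.pyRange 0 numCols 1).foldl (fun parts col =>
        let idx := row + col * numRows
        if idx < (entries.length : Int) then
          -- idx is in range here, so pyGetD's default is never used
          let entry := PySem.List.pyGetD entries idx ""
          if col < numCols - 1 then parts ++ [pyLjust entry colWidth]
          else parts ++ [entry]
        else parts) []
      lines ++ [PySem.Str.rstrip (PySem.Str.join "" lineParts)]) []
    PySem.Str.join "\n" lines

-- ===== PORT B =====
def format_directory_columns_alt (entries : List String) (width : Int) : String :=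
  if entries = [] then ""
  else
    let colWidth : Int := (PySem.List.max? (entries.map (fun e => PySem.Str.len e)) id).getD 0 + 2
    let numCols : Int := max 1 (PySem.Int.floordiv width colWidth)
    let numRows : Int := PySem.Int.floordiv ((entries.length : Int) + numCols - 1) numCols
    -- entries[r::num_rows]: numRows > 0 here, so slice? is some and getD's default is never used
    let lines : List String := (PySem.List.pyRange 0 numRows 1).map (fun r =>
      PySem.Str.rstrip (PySem.Str.join ""
        (((PySem.List.slice? entries (some r) none numRows).getD []).map (fun e => pyLjust e colWidth))))
    PySem.Str.join "\n" lines

-- ===== PRECONDITION & SPEC =====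
def Spec_format_directory_columns (entries : List String) (width : Int) (out : String) : Prop := out = format_directory_columns_alt entries width
instance (entries : List String) (width : Int) (out : String) : Decidable (Spec_format_directory_columns entries width out) := by unfold Spec_format_directory_columns; infer_instance

-- ===== CLAIM (what is proved, stated in full; the proofs are below) =====
def Claim_equal_format_directory_columns : Prop := ∀ (entries : List String) (width : Int), Dom_format_directory_columns entries width → Spec_format_directory_columns entries width (format_directory_columns entries width)

-- ===== LEMMAS AND PROOFS =====

-- characterisation of the stride slice entries[r::s] for 0 ≤ r < len, s > 0
theorem slice_stride_eq (xs : List String) (rN sN : Nat) (hs : 0 < sN) (hr : rN < xs.length) :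
    (PySem.List.slice? xs (some (rN : Int)) none (sN : Int)).getD []
      = (List.range ((xs.length - rN - 1) / sN + 1)).map (fun k => xs.getD (rN + sN * k) "") := by
  have hsne : (sN : Int) ≠ 0 := by exact_mod_cast hs.ne'
  have hnotneg : ¬ ((sN : Int) < 0) := by omega
  unfold PySem.List.slice? PySem.List.sliceIndices
  simp only [hsne, hnotneg, if_false]
  have h1 : ¬((rN:Int) < 0) := by omega
  have h4 : (rN:Int) < (xs.length:Int) := by exact_mod_cast hr
  have h2 : min (rN:Int) (xs.length:Int) = (rN:Int) := by omega
  have h3 : (0:Int) < (sN:Int) := by exact_mod_cast hs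
  simp only [if_neg h1, h2, if_pos h3, if_pos h4, Option.getD_some]
  have hc : ((xs.length:Int) - rN + sN - 1) = ((xs.length - rN - 1 + sN : Nat) : Int) := by
    push_cast; omega
  rw [hc]
  have hdiv : ((xs.length - rN - 1 + sN : Nat) : Int) / (sN:Int)
      = (((xs.length - rN - 1 + sN) / sN : Nat) : Int) := by
    norm_cast
  rw [hdiv, Int.toNat_natCast, Nat.add_div_right _ hs]
  have hmem : ∀ k ∈ List.range ((xs.length - rN - 1)/sN + 1),
      xs[((rN:Int) + (sN:Int) * (k:Int)).toNat]? = some (xs.getD (rN + sN * k) "") := by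
    intro k hk
    rw [List.mem_range] at hk
    have hidx : rN + sN * k < xs.length := by
      have h5 : k ≤ (xs.length - rN - 1)/sN := by omega
      have h6 : k * sN ≤ xs.length - rN - 1 := (Nat.le_div_iff_mul_le hs).mp h5
      rw [Nat.mul_comm] at h6
      generalize sN * k = t at h6 ⊢
      omega
    have ht : ((rN:Int) + (sN:Int) * (k:Int)).toNat = rN + sN * k := by
      rw [show ((rN:Int) + (sN:Int) * (k:Int)) = ((rN + sN * k : Nat) : Int) by push_cast; ring,
          Int.toNat_natCast]
    rw [ht, List.getElem?_eq_getElem hidx]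
    simp [List.getD_eq_getElem?_getD, List.getElem?_eq_getElem hidx]
  rw [List.filterMap_congr hmem]
  simp

-- a filter of range(0, n) by a ≤-closed predicate is a shorter range
theorem filter_pyRange_eq (n k : Int) (p : Int → Bool) (hkn : k ≤ n) (hk : 0 ≤ k)
    (h1 : ∀ c : Int, 0 ≤ c → c < k → p c = true)
    (h2 : ∀ c : Int, k ≤ c → c < n → p c = false) :
    (PySem.List.pyRange 0 n 1).filter p = PySem.List.pyRange 0 k 1 := by
  have ha : (PySem.List.pyRange 0 k 1).filter p = PySem.List.pyRange 0 k 1 :=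
    List.filter_eq_self.mpr (fun c hc => by
      rw [PySem.List.mem_pyRange_one] at hc; exact h1 c hc.1 hc.2)
  have hb : (PySem.List.pyRange k n 1).filter p = [] :=
    List.filter_eq_nil_iff.mpr (fun c hc => by
      rw [PySem.List.mem_pyRange_one] at hc; simp [h2 c hc.1 hc.2])
  rw [PySem.List.pyRange_one_append 0 k n hk hkn, List.filter_append, ha, hb, List.append_nil]

-- joining with the empty separator is concatenation
theorem charsJoin_nil (l : List (List Char)) : PySem.Chars.join [] l = l.flatten := by
  simp [PySem.Chars.join, List.intercalate]
  induction l with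
  | nil => simp
  | cons a t ih => cases t <;> simp_all [List.intersperse]

-- rstrip eats a block of trailing spaces
theorem rstrip_append_spaces (cs : List Char) (m : Nat) :
    PySem.Chars.rstrip (cs ++ List.replicate m ' ') = PySem.Chars.rstrip cs := by
  simp [PySem.Chars.rstrip, List.reverse_append]
  induction m with
  | zero => simp
  | succ k ih => simpa [List.replicate_succ, PySem.Chars.isspace] using ih

-- padding the last cell too is erased by rstrip
theorem rstrip_join_last (ps : List String) (x : String) (w : Int) :
    PySem.Str.rstrip (PySem.Str.join "" (ps ++ [x]))
      = PySem.Str.rstrip (PySem.Str.join "" (ps ++ [pyLjust x w])) := by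
  have hinj : ∀ s t : String, s.toList = t.toList → s = t := fun s t h => by
    have := congrArg String.ofList h; simpa using this
  apply hinj
  simp [PySem.Str.toList_rstrip, PySem.Str.toList_join, charsJoin_nil, pyLjust,
        ← List.append_assoc, rstrip_append_spaces]

-- A's inner column loop, written as filter + map over the column range
theorem foldl_cols (entries : List String) (cw nc nr row : Int) (l : List Int) (acc : List String) :
    l.foldl (fun parts col =>
        if row + col * nr < (entries.length:Int) then
          (if col < nc - 1 then parts ++ [pyLjust (PySem.List.pyGetD entries (row + col * nr) "") cw]
           else parts ++ [PySem.List.pyGetD entries (row + col * nr) ""])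
        else parts) acc
      = acc ++ (l.filter (fun col => decide (row + col * nr < (entries.length:Int)))).map
          (fun col => if col < nc - 1 then pyLjust (PySem.List.pyGetD entries (row + col * nr) "") cw
                      else PySem.List.pyGetD entries (row + col * nr) "") := by
  induction l generalizing acc with
  | nil => simp
  | cons c t ih =>
      by_cases h1 : row + c * nr < (entries.length:Int) <;>
        by_cases h2 : c < nc - 1 <;> simp [h1, h2, ih]

-- one row of the layout: A's branched column loop equals B's uniformly padded stride slice
theorem row_eq (entries : List String) (cw : Int) (ncN nrN rN : Nat)
    (_hnc : 0 < ncN) (hnr : 0 < nrN) (hrlen : rN < entries.length)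
    (hlen : entries.length ≤ ncN * nrN) :
    PySem.Str.rstrip (PySem.Str.join "" ((PySem.List.pyRange 0 (ncN:Int) 1).foldl (fun parts col =>
        if (rN:Int) + col * (nrN:Int) < (entries.length:Int) then
          (if col < (ncN:Int) - 1 then parts ++ [pyLjust (PySem.List.pyGetD entries ((rN:Int) + col * (nrN:Int)) "") cw]
           else parts ++ [PySem.List.pyGetD entries ((rN:Int) + col * (nrN:Int)) ""])
        else parts) []))
    = PySem.Str.rstrip (PySem.Str.join ""
        (((PySem.List.slice? entries (some (rN:Int)) none (nrN:Int)).getD []).map (fun e => pyLjust e cw))) := by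
  rw [foldl_cols, slice_stride_eq entries rN nrN hnr hrlen, List.nil_append]
  set m := (entries.length - rN - 1) / nrN with hm
  have hdm := Nat.div_add_mod (entries.length - rN - 1) nrN
  rw [← hm] at hdm
  have hmod : (entries.length - rN - 1) % nrN < nrN := Nat.mod_lt _ hnr
  have hKle : m + 1 ≤ ncN := by
    have h7 : m < ncN := by
      rw [hm]
      apply (Nat.div_lt_iff_lt_mul hnr).mpr
      calc entries.length - rN - 1 < entries.length := by omega
        _ ≤ ncN * nrN := hlen
    omega
  have hpg : ∀ kN : Nat, PySem.List.pyGetD entries ((rN:Int) + (kN:Int) * (nrN:Int)) ""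
      = entries.getD (rN + nrN * kN) "" := by
    intro kN
    rw [PySem.List.pyGetD_of_nonneg _ _ (by positivity)]
    congr 1
    rw [show ((rN:Int) + (kN:Int) * (nrN:Int)) = ((rN + nrN * kN : Nat) : Int) by push_cast; ring,
        Int.toNat_natCast]
  have hfilter : (PySem.List.pyRange 0 (ncN:Int) 1).filter
      (fun col => decide ((rN:Int) + col * (nrN:Int) < (entries.length:Int)))
      = PySem.List.pyRange 0 ((m+1 : Nat):Int) 1 := by
    apply filter_pyRange_eq _ _ _ (by exact_mod_cast hKle) (by positivity)
    · intro c hc0 hck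
      obtain ⟨cN, rfl⟩ : ∃ t:Nat, c = (t:Int) := ⟨c.toNat, by omega⟩
      have hcK : cN < m + 1 := by exact_mod_cast hck
      have h6 : cN * nrN ≤ entries.length - rN - 1 := by
        rw [hm] at hcK
        exact (Nat.le_div_iff_mul_le hnr).mp (by omega)
      simp only [decide_eq_true_eq]
      rw [show ((rN:Int) + (cN:Int) * (nrN:Int)) = ((rN + cN * nrN : Nat) : Int) by push_cast; ring]
      have h8 : rN + cN * nrN < entries.length := by
        generalize cN * nrN = t at h6 ⊢
        omega
      exact_mod_cast h8
    · intro c hcK hcn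
      have hc0 : (0:Int) ≤ c := le_trans (by positivity) hcK
      obtain ⟨cN, rfl⟩ : ∃ t:Nat, c = (t:Int) := ⟨c.toNat, by omega⟩
      have hKc : m + 1 ≤ cN := by exact_mod_cast hcK
      have h9 : (m + 1) * nrN ≤ cN * nrN := Nat.mul_le_mul_right _ hKc
      have h10 : entries.length - rN - 1 < (m + 1) * nrN := by
        have : (m + 1) * nrN = nrN * m + nrN := by ring
        rw [this]
        generalize nrN * m = u at hdm ⊢
        omega
      have h11 : entries.length ≤ rN + cN * nrN := by
        generalize cN * nrN = t at h9 ⊢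
        generalize (m + 1) * nrN = u at h9 h10
        omega
      simp only [decide_eq_false_iff_not, not_lt]
      rw [show ((rN:Int) + (cN:Int) * (nrN:Int)) = ((rN + cN * nrN : Nat) : Int) by push_cast; ring]
      exact_mod_cast h11
  rw [hfilter, PySem.List.pyRange_one]
  simp only [Int.sub_zero, Int.toNat_natCast, List.map_map, Function.comp_def, zero_add]
  rw [List.range_succ, List.map_append, List.map_append]
  have hmaps : ∀ k ∈ List.range m,
      (if ((k:Nat):Int) < (ncN:Int) - 1 then pyLjust (PySem.List.pyGetD entries ((rN:Int) + (k:Int) * (nrN:Int)) "") cw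
       else PySem.List.pyGetD entries ((rN:Int) + (k:Int) * (nrN:Int)) "")
      = pyLjust (entries.getD (rN + nrN * k) "") cw := by
    intro k hk
    rw [List.mem_range] at hk
    have hlt : ((k:Nat):Int) < (ncN:Int) - 1 := by omega
    rw [if_pos hlt, hpg k]
  rw [List.map_congr_left hmaps]
  by_cases hlast : ((m:Nat):Int) < (ncN:Int) - 1
  · rw [List.map_singleton, List.map_singleton, if_pos hlast, hpg m]
  · rw [List.map_singleton, List.map_singleton, if_neg hlast, hpg m]
    exact rstrip_join_last _ _ cw

-- ===== VERDICT (by name: the statement is the Claim_ definition above) =====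
theorem format_directory_columns_spec : Claim_equal_format_directory_columns := by
  intro entries width _
  unfold Spec_format_directory_columns format_directory_columns format_directory_columns_alt
  by_cases hne : entries = []
  · simp [hne]
  · have hlen : 0 < entries.length := List.length_pos_iff.mpr hne
    simp only [if_neg hne]
    set nc : Int := max 1 (PySem.Int.floordiv width
      ((PySem.List.max? (entries.map (fun e => PySem.Str.len e)) id).getD 0 + 2))
    have hnc1 : (1:Int) ≤ nc := le_max_left _ _
    obtain ⟨ncN, hncN, hncN1⟩ : ∃ t:Nat, nc = (t:Int) ∧ 0 < t := ⟨nc.toNat, by omega, by omega⟩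
    rw [hncN]
    have hrw : ((entries.length:Int) + (ncN:Int) - 1) = ((entries.length + ncN - 1 : Nat) : Int) := by
      omega
    rw [hrw, PySem.Int.floordiv_natCast]
    set nrN := (entries.length + ncN - 1) / ncN with hnrN
    have hnr0 : 0 < nrN := by
      rw [hnrN]
      exact (Nat.le_div_iff_mul_le hncN1).mpr (by omega)
    have hdm := Nat.div_add_mod (entries.length + ncN - 1) ncN
    rw [← hnrN] at hdm
    have hmod : (entries.length + ncN - 1) % ncN < ncN := Nat.mod_lt _ hncN1
    have hlenle : entries.length ≤ ncN * nrN := by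
      generalize ncN * nrN = t at hdm ⊢
      omega
    have hnrlen : nrN ≤ entries.length := by
      have h := (Nat.div_lt_iff_lt_mul hncN1).mpr
        (show entries.length + ncN - 1 < (entries.length + 1) * ncN by
          have h1 : (entries.length + 1) * ncN = entries.length * ncN + ncN := by ring
          have h2 : entries.length ≤ entries.length * ncN := Nat.le_mul_of_pos_right _ hncN1
          generalize entries.length * ncN = t at h1 h2 ⊢
          omega)
      rw [← hnrN] at h
      omega
    congr 1
    rw [PySem.List.foldl_append_singleton_eq_map, List.nil_append]
    apply List.map_congr_left
    intro row hrow
    rw [PySem.List.mem_pyRange_one] at hrow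
    obtain ⟨rN, rfl⟩ : ∃ t:Nat, row = (t:Int) := ⟨row.toNat, by omega⟩
    have hrN : rN < nrN := by exact_mod_cast hrow.2
    exact row_eq entries _ ncN nrN rN hncN1 hnr0 (lt_of_lt_of_le hrN hnrlen) hlenle
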